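-- pv_equiv track=rewrite | github.com/Melliti-Ounaissa/SSAD-TP1 | crypto_algos/algos/hill.py | restore_case
-- ===== SOURCE A (Python) =====
-- def restore_case(decrypted_text, original_text):
--     """Restaure la casse originale du texte déchiffré en respectant les espaces et en enlevant le padding."""
--     decrypted_clean = decrypted_text.replace('#', '')  # caractères déchiffrés sans padding/espace
--     result = []
--     idx = 0
--
--     for ch in original_text:
--         if ch == ' ':
--             result.append(' ')
--         else:
--             if idx < len(decrypted_clean):
--                 decoded_char = decrypted_clean[idx]
--                 result.append(decoded_char.lower() if ch.islower() else decoded_char.upper())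
--                 idx += 1
--             else:
--                 break
--
--     return ''.join(result).rstrip()
-- ===== SOURCE B (Python) =====
-- def restore_case(decrypted_text, original_text):
--     """Word-based decomposition: split the original on spaces, slice the cleaned
--     decrypted text into per-word segments, recase each segment with zip, rejoin."""
--     clean = decrypted_text.replace('#', '')
--     pieces = []
--     k = 0
--     for w in original_text.split(' '):
--         seg = clean[k:k + len(w)]
--         pieces.append(''.join(d.lower() if c.islower() else d.upper() for c, d in zip(w, seg)))
--         k += len(w)
--     return ' '.join(pieces).rstrip()
-- ===== Notes on version B (the rewrite author's own statement) =====
-- stated objective: alternative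
-- what changed: B splits the original text into space-separated words, slices the '#'-cleaned decrypted text into one segment per word, recases each word by zipping it with its segment, and rejoins with spaces before rstrip, instead of A's single character-by-character loop with an index cursor and a break on exhaustion.
import Mathlib
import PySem

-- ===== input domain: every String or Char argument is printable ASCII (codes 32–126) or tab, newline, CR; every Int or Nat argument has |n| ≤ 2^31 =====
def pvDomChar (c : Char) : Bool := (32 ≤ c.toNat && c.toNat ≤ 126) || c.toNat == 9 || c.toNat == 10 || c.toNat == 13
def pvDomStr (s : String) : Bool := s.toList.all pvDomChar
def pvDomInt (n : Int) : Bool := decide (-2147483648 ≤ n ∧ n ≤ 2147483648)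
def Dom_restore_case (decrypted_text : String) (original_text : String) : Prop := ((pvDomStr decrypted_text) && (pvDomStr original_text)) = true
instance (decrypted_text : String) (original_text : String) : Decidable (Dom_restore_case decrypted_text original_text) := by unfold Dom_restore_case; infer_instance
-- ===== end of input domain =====

-- B restores case word-by-word (split on spaces, slice + zip per word, rejoin) instead of
-- A's single interleaved consume loop with a break; objective: alternative decomposition.

-- ===== PORT A =====
-- the for-loop of A: `result` list, `idx` cursor into decrypted_clean, break on exhaustion
def pvLoopA (clean : List Char) : List Char → Nat → List Char
  | [], _ => []
  | ch :: rest, idx =>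
    if ch = ' ' then ' ' :: pvLoopA clean rest idx
    else if idx < clean.length then
      (if PySem.Chars.islower ch then PySem.Chars.lowerChar (clean.getD idx ' ')
       else PySem.Chars.upperChar (clean.getD idx ' ')) :: pvLoopA clean rest (idx + 1)
    else []

def restore_case (decrypted_text : String) (original_text : String) : String :=
  let decrypted_clean := PySem.Chars.replace decrypted_text.toList ['#'] []
  String.ofList (PySem.Chars.rstrip (pvLoopA decrypted_clean original_text.toList 0))

-- ===== PORT B =====
-- one recased word: zip the original word with its slice of the cleaned decrypted text
def pvPiece (w seg : List Char) : List Char :=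
  (w.zip seg).map (fun p =>
    if PySem.Chars.islower p.1 then PySem.Chars.lowerChar p.2 else PySem.Chars.upperChar p.2)

def restore_case_alt (decrypted_text : String) (original_text : String) : String :=
  let clean := PySem.Chars.replace decrypted_text.toList ['#'] []
  let words := PySem.Chars.splitOn original_text.toList [' ']
  let st := words.foldl (fun (st : List (List Char) × Nat) w =>
      let seg := PySem.List.slice clean (some (st.2 : Int)) (some ((st.2 + w.length : Nat) : Int))
      (st.1 ++ [pvPiece w seg], st.2 + w.length)) ([], 0)
  String.ofList (PySem.Chars.rstrip (PySem.Chars.join [' '] st.1))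

-- ===== PRECONDITION & SPEC =====
def Spec_restore_case (decrypted_text : String) (original_text : String) (out : String) : Prop := out = restore_case_alt decrypted_text original_text
instance (decrypted_text : String) (original_text : String) (out : String) : Decidable (Spec_restore_case decrypted_text original_text out) := by unfold Spec_restore_case; infer_instance

-- ===== CLAIM (what is proved, stated in full; the proofs are below) =====
def Claim_equal_restore_case : Prop := ∀ (decrypted_text : String) (original_text : String), Dom_restore_case decrypted_text original_text → Spec_restore_case decrypted_text original_text (restore_case decrypted_text original_text)

-- ===== LEMMAS AND PROOFS =====

-- reference split: words of l (split on ' '), cur = current word reversed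
def pvMsp : List Char → List Char → List (List Char)
  | [], cur => [cur.reverse]
  | c :: rest, cur => if c = ' ' then cur.reverse :: pvMsp rest [] else pvMsp rest (c :: cur)

-- A's loop with the clean text as a consumed list instead of an index
def pvLoopC : List Char → List Char → List Char
  | _, [] => []
  | C, ch :: rest =>
    if ch = ' ' then ' ' :: pvLoopC C rest
    else
      match C with
      | [] => []
      | d :: ds =>
        (if PySem.Chars.islower ch then PySem.Chars.lowerChar d else PySem.Chars.upperChar d)
          :: pvLoopC ds rest

-- B's fold with the clean text as a consumed list
def pvBp : List (List Char) → List Char → List (List Char)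
  | [], _ => []
  | w :: ws, C => pvPiece w (C.take w.length) :: pvBp ws (C.drop w.length)

theorem pvSplitGo_eq (l : List Char) : ∀ (fuel : Nat) (cur : List Char) (acc : List (List Char)),
    l.length ≤ fuel →
    PySem.Chars.splitOn.go [' '] fuel l cur acc = acc.reverse ++ pvMsp l cur := by
  induction l with
  | nil =>
    intro fuel cur acc _
    cases fuel <;> simp [PySem.Chars.splitOn.go, pvMsp]
  | cons c rest ih =>
    intro fuel cur acc hle
    cases fuel with
    | zero => simp at hle
    | succ n =>
      rw [PySem.Chars.splitOn.go]
      by_cases hc : c = ' '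
      · subst hc
        simp only [List.isPrefixOf]
        rw [if_pos (by decide)]
        rw [show List.drop [' '].length (' ' :: rest) = rest from rfl]
        rw [ih n [] (cur.reverse :: acc) (by simpa using Nat.le_of_succ_le_succ hle)]
        simp [pvMsp]
      · have hpre : List.isPrefixOf [' '] (c :: rest) = false := by
          simp [List.isPrefixOf]; intro h; exact absurd h.symm hc
        rw [hpre]
        simp only [Bool.false_eq_true, if_false]
        rw [ih n (c :: cur) acc (by simpa using Nat.le_of_succ_le_succ hle)]
        simp [pvMsp, hc]


theorem pvSplitOn_eq (s : List Char) : PySem.Chars.splitOn s [' '] = pvMsp s [] := by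
  rw [PySem.Chars.splitOn, pvSplitGo_eq s (s.length + 1) [] [] (by omega)]
  simp


theorem pvMsp_ne_nil (l : List Char) : ∀ cur, pvMsp l cur ≠ [] := by
  induction l with
  | nil => intro cur; simp [pvMsp]
  | cons c rest ih =>
    intro cur
    by_cases hc : c = ' ' <;> simp [pvMsp, hc, ih]


theorem pvMsp_join (l : List Char) : ∀ cur,
    PySem.Chars.join [' '] (pvMsp l cur) = cur.reverse ++ l := by
  induction l with
  | nil => intro cur; simp [pvMsp, PySem.Chars.join_singleton]
  | cons c rest ih =>
    intro cur
    by_cases hc : c = ' '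
    · subst hc
      rw [pvMsp, if_pos rfl]
      obtain ⟨q, qs, hq⟩ : ∃ q qs, pvMsp rest [] = q :: qs := by
        cases h : pvMsp rest [] with
        | nil => exact absurd h (pvMsp_ne_nil rest [])
        | cons q qs => exact ⟨q, qs, rfl⟩
      rw [hq, PySem.Chars.join_cons_cons, ← hq, ih []]
      simp
    · rw [pvMsp]
      simp only [if_neg hc]
      rw [ih (c :: cur)]
      simp


theorem pvMsp_spacefree (l : List Char) : ∀ cur, (∀ c ∈ cur, c ≠ ' ') →
    ∀ w ∈ pvMsp l cur, ∀ c ∈ w, c ≠ ' ' := by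
  induction l with
  | nil =>
    intro cur hcur w hw
    simp [pvMsp] at hw
    subst hw
    intro c hc
    exact hcur c (by simpa using hc)
  | cons a rest ih =>
    intro cur hcur w hw
    by_cases ha : a = ' '
    · rw [pvMsp, if_pos ha] at hw
      rcases List.mem_cons.mp hw with hw1 | hw1
      · subst hw1; intro c hc; exact hcur c (by simpa using hc)
      · exact ih [] (by simp) w hw1
    · rw [pvMsp, if_neg ha] at hw
      refine ih (a :: cur) ?_ w hw
      intro c hc
      rcases List.mem_cons.mp hc with h | h
      · subst h; exact ha
      · exact hcur c h


theorem pvLoopA_eq (clean : List Char) (L : List Char) : ∀ idx,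
    pvLoopA clean L idx = pvLoopC (clean.drop idx) L := by
  induction L with
  | nil => intro idx; simp [pvLoopA, pvLoopC]
  | cons ch rest ih =>
    intro idx
    rw [pvLoopA]
    by_cases hch : ch = ' '
    · subst hch
      rw [if_pos rfl, ih idx]
      conv_rhs => rw [pvLoopC.eq_def]
      simp
    · rw [if_neg hch]
      by_cases hidx : idx < clean.length
      · rw [if_pos hidx, ih (idx + 1)]
        rw [List.drop_eq_getElem_cons hidx]
        rw [pvLoopC, if_neg hch]
        rw [List.getD_eq_getElem clean ' ' hidx]
      · rw [if_neg hidx]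
        rw [List.drop_eq_nil_iff.mpr (by omega)]
        rw [pvLoopC.eq_def]
        simp [hch]


theorem pvFoldB_eq (clean : List Char) (ws : List (List Char)) :
    ∀ (acc : List (List Char)) (k : Nat),
    (ws.foldl (fun (st : List (List Char) × Nat) w =>
      let seg := PySem.List.slice clean (some (st.2 : Int)) (some ((st.2 + w.length : Nat) : Int))
      (st.1 ++ [pvPiece w seg], st.2 + w.length)) (acc, k)).1
      = acc ++ pvBp ws (clean.drop k) := by
  induction ws with
  | nil => intro acc k; simp [pvBp]
  | cons w ws ih =>
    intro acc k
    rw [List.foldl_cons, ih]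
    have hslice : PySem.List.slice clean (some (k : Int)) (some ((k + w.length : Nat) : Int))
        = (clean.drop k).take w.length := by
      rw [PySem.List.slice_toNat clean (by positivity) (by positivity)]
      simp only [Int.toNat_natCast]
      congr 1
      omega
    simp only [hslice]
    rw [pvBp]
    simp [List.drop_drop]


theorem pvPiece_take (w : List Char) : ∀ C, pvPiece w (C.take w.length) = pvPiece w C := by
  induction w with
  | nil => intro C; simp [pvPiece]
  | cons a w ih =>
    intro C
    cases C with
    | nil => simp [pvPiece]
    | cons d ds =>
      simp only [List.length_cons, List.take_succ_cons, pvPiece, List.zip_cons_cons, List.map_cons]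
      have := ih ds
      simp only [pvPiece] at this
      rw [this]


theorem pvW1 (w : List Char) : ∀ C l, (∀ c ∈ w, c ≠ ' ') → w.length ≤ C.length →
    pvLoopC C (w ++ l) = pvPiece w C ++ pvLoopC (C.drop w.length) l := by
  induction w with
  | nil => intro C l _ _; simp [pvPiece]
  | cons a w ih =>
    intro C l hsf hlen
    cases C with
    | nil => simp at hlen
    | cons d ds =>
      have ha : a ≠ ' ' := hsf a (by simp)
      rw [List.cons_append, pvLoopC, if_neg ha]
      rw [ih ds l (fun c hc => hsf c (by simp [hc])) (by simpa using hlen)]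
      simp [pvPiece]


theorem pvW2 (w : List Char) : ∀ C l, (∀ c ∈ w, c ≠ ' ') → C.length < w.length →
    pvLoopC C (w ++ l) = pvPiece w C := by
  induction w with
  | nil => intro C l _ h; simp at h
  | cons a w ih =>
    intro C l hsf hlen
    have ha : a ≠ ' ' := hsf a (by simp)
    cases C with
    | nil =>
      rw [List.cons_append, pvLoopC, if_neg ha]
      simp [pvPiece]
    | cons d ds =>
      rw [List.cons_append, pvLoopC, if_neg ha]
      rw [ih ds l (fun c hc => hsf c (by simp [hc])) (by simpa using hlen)]
      simp [pvPiece]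


theorem pvBp_nil (ws : List (List Char)) (h : ws ≠ []) :
    PySem.Chars.join [' '] (pvBp ws []) = List.replicate (ws.length - 1) ' ' := by
  induction ws with
  | nil => exact absurd rfl h
  | cons w ws ih =>
    cases ws with
    | nil => simp [pvBp, pvPiece, PySem.Chars.join_singleton]
    | cons w' ws' =>
      have h1 : pvBp (w :: w' :: ws') [] = [] :: pvBp (w' :: ws') [] := by
        simp [pvBp, pvPiece]
      have h2 : pvBp (w' :: ws') [] = pvPiece w' [] :: pvBp ws' [] := by
        simp [pvBp]
      rw [h1, h2, PySem.Chars.join_cons_cons, ← h2, ih (by simp)]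
      simp [List.replicate_succ]


theorem pvMain (ws : List (List Char)) : ∀ C, ws ≠ [] →
    (∀ w ∈ ws, ∀ c ∈ w, c ≠ ' ') →
    ∃ j, PySem.Chars.join [' '] (pvBp ws C)
        = pvLoopC C (PySem.Chars.join [' '] ws) ++ List.replicate j ' ' := by
  induction ws with
  | nil => intro C h _; exact absurd rfl h
  | cons w ws ih =>
    intro C _ hsf
    have hwsf : ∀ c ∈ w, c ≠ ' ' := hsf w (by simp)
    cases ws with
    | nil =>
      refine ⟨0, ?_⟩
      rw [pvBp, pvBp, PySem.Chars.join_singleton, PySem.Chars.join_singleton]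
      rw [pvPiece_take]
      rcases Nat.lt_or_ge C.length w.length with hlt | hge
      · rw [← List.append_nil w, pvW2 w C [] hwsf hlt]
        simp
      · rw [← List.append_nil w, pvW1 w C [] hwsf hge]
        simp [pvLoopC]
    | cons w' ws' =>
      obtain ⟨q, qs, hq⟩ : ∃ q qs, pvBp (w' :: ws') (C.drop w.length) = q :: qs := by
        cases h : pvBp (w' :: ws') (C.drop w.length) with
        | nil => simp [pvBp] at h
        | cons q qs => exact ⟨q, qs, rfl⟩
      rw [pvBp, hq, PySem.Chars.join_cons_cons, ← hq, pvPiece_take]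
      rw [PySem.Chars.join_cons_cons]
      rcases Nat.lt_or_ge C.length w.length with hlt | hge
      · -- clean exhausts inside w : A stops, B's tail is all spaces
        have hdrop : C.drop w.length = [] := List.drop_eq_nil_iff.mpr (by omega)
        rw [hdrop, pvBp_nil (w' :: ws') (by simp)]
        simp only [List.append_assoc, List.singleton_append]
        rw [pvW2 w C (' ' :: PySem.Chars.join [' '] (w' :: ws')) hwsf hlt]
        exact ⟨(w' :: ws').length, by simp [List.replicate_succ]⟩
      · simp only [List.append_assoc, List.singleton_append]
        rw [pvW1 w C (' ' :: PySem.Chars.join [' '] (w' :: ws')) hwsf hge]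
        rw [pvLoopC.eq_def]
        obtain ⟨j, hj⟩ := ih (C.drop w.length) (by simp) (fun u hu => hsf u (by simp [hu]))
        exact ⟨j, by rw [hj]; simp⟩


theorem pvRstrip_spaces (x : List Char) (j : Nat) :
    PySem.Chars.rstrip (x ++ List.replicate j ' ') = PySem.Chars.rstrip x := by
  unfold PySem.Chars.rstrip
  rw [List.reverse_append, List.reverse_replicate, List.dropWhile_append,
    List.dropWhile_replicate]
  simp [show PySem.Chars.isspace ' ' = true from rfl]


-- ===== VERDICT (by name: the statement is the Claim_ definition above) =====
theorem restore_case_spec : Claim_equal_restore_case := by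
  intro d o _
  show _ = _
  simp only [restore_case, restore_case_alt]
  rw [pvSplitOn_eq, pvFoldB_eq, pvLoopA_eq]
  simp only [List.drop_zero, List.nil_append]
  obtain ⟨j, hj⟩ := pvMain (pvMsp o.toList []) (PySem.Chars.replace d.toList ['#'] [])
    (pvMsp_ne_nil o.toList []) (pvMsp_spacefree o.toList [] (by simp))
  rw [hj, pvRstrip_spaces]
  rw [pvMsp_join o.toList []]
  simp
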